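-- pv_equiv track=rewrite | github.com/TGITS/programming-workouts | advent_of_code/2024/day8/python/aoc2024_8_1/AoC2024_d8_p1.py | find_unfiltered_antinodes_locations
-- ===== SOURCE A (Python) =====
-- import itertools
--
-- def get_antinodes_for_pair(
--     antenna_1: tuple[int, int], antenna_2: tuple[int, int]
-- ) -> tuple[tuple[int, int], tuple[int, int]]:
--     x1 = antenna_1[0]
--     y1 = antenna_1[1]
--     x2 = antenna_2[0]
--     y2 = antenna_2[1]
--     dx = x2 - x1
--     dy = y2 - y1
--
--     return ((x1 - dx, y1 - dy), (x2 + dx, y2 + dy))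
--
-- def find_unfiltered_antinodes_locations(
--     antennas_coordinates_by_frequency: dict[str, list[tuple[int, int]]],
-- ) -> set[tuple[int, int]]:
--     antinodes_locations = set()
--     for v in antennas_coordinates_by_frequency.values():
--         antennas_combinations = itertools.combinations(v, 2)
--         for combination in antennas_combinations:
--             for pair in get_antinodes_for_pair(combination[0], combination[1]):
--                 antinodes_locations.add(pair)
--
--     return antinodes_locations
-- ===== SOURCE B (Python) =====
-- def find_unfiltered_antinodes_locations(antennas_coordinates_by_frequency):
--     def antinodes(points):
--         if not points:
--             return []
--         a, *rest = points
--         here = [p for b in rest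
--                   for p in ((2 * a[0] - b[0], 2 * a[1] - b[1]),
--                             (2 * b[0] - a[0], 2 * b[1] - a[1]))]
--         return here + antinodes(rest)
--
--     return set(p
--                for v in antennas_coordinates_by_frequency.values()
--                for p in antinodes(v))
-- ===== Notes on version B (the rewrite author's own statement) =====
-- stated objective: simpler
-- what changed: Replaces the itertools.combinations loop with a helper mutating a shared set by a recursive head-vs-rest decomposition that builds one flat candidate list via the direct formula 2*a-b (no dx/dy helper) and constructs the set once at the end.
import Mathlib
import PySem

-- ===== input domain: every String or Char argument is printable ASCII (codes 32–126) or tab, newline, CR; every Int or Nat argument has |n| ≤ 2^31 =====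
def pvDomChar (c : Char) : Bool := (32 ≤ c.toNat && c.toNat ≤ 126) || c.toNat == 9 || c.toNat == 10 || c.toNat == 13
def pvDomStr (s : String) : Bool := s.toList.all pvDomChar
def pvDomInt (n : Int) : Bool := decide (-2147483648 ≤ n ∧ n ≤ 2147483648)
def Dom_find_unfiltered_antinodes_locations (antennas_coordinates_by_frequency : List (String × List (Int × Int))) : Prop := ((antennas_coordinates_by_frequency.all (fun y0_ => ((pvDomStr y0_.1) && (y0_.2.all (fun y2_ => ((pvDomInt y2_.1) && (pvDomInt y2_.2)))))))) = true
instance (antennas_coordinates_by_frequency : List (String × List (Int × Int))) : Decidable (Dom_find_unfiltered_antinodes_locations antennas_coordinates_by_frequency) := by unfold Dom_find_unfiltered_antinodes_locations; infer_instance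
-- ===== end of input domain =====

-- B replaces the combinations-plus-helper scheme mutating a shared set with a recursive
-- head-vs-rest decomposition building one flat candidate list (direct 2*a-b formula),
-- turned into a set once at the end; objective: simpler.

-- ===== PORT A =====
def get_antinodes_for_pair (antenna_1 antenna_2 : Int × Int) : (Int × Int) × (Int × Int) :=
  let x1 := antenna_1.1
  let y1 := antenna_1.2
  let x2 := antenna_2.1
  let y2 := antenna_2.2
  let dx := x2 - x1
  let dy := y2 - y1
  ((x1 - dx, y1 - dy), (x2 + dx, y2 + dy))

-- itertools.combinations(v, 2), ported by hand; exact: same lexicographic pair order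
def pvCombinations2 : List (Int × Int) → List ((Int × Int) × (Int × Int))
  | [] => []
  | a :: t => t.map (fun b => (a, b)) ++ pvCombinations2 t

def find_unfiltered_antinodes_locations (antennas_coordinates_by_frequency : List (String × List (Int × Int))) : List (Int × Int) :=
  antennas_coordinates_by_frequency.foldl (fun acc kv =>
    (pvCombinations2 kv.2).foldl (fun s c =>
      let pts := get_antinodes_for_pair c.1 c.2
      PySem.Set.add (PySem.Set.add s pts.1) pts.2) acc) PySem.Set.empty

-- ===== PORT B =====
-- recursive helper 'antinodes' of Source B
def pvAntinodesB : List (Int × Int) → List (Int × Int)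
  | [] => []
  | a :: rest =>
      rest.flatMap (fun b =>
        [(2 * a.1 - b.1, 2 * a.2 - b.2), (2 * b.1 - a.1, 2 * b.2 - a.2)]) ++ pvAntinodesB rest

def find_unfiltered_antinodes_locations_alt (antennas_coordinates_by_frequency : List (String × List (Int × Int))) : List (Int × Int) :=
  PySem.Set.ofList (antennas_coordinates_by_frequency.flatMap (fun kv => pvAntinodesB kv.2))

-- ===== PRECONDITION & SPEC =====
def Spec_find_unfiltered_antinodes_locations (antennas_coordinates_by_frequency : List (String × List (Int × Int))) (out : List (Int × Int)) : Prop := out = find_unfiltered_antinodes_locations_alt antennas_coordinates_by_frequency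
instance (antennas_coordinates_by_frequency : List (String × List (Int × Int))) (out : List (Int × Int)) : Decidable (Spec_find_unfiltered_antinodes_locations antennas_coordinates_by_frequency out) := by unfold Spec_find_unfiltered_antinodes_locations; infer_instance

-- ===== CLAIM (what is proved, stated in full; the proofs are below) =====
def Claim_equal_find_unfiltered_antinodes_locations : Prop := ∀ (antennas_coordinates_by_frequency : List (String × List (Int × Int))), Dom_find_unfiltered_antinodes_locations antennas_coordinates_by_frequency → Spec_find_unfiltered_antinodes_locations antennas_coordinates_by_frequency (find_unfiltered_antinodes_locations antennas_coordinates_by_frequency)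

-- ===== LEMMAS AND PROOFS =====

theorem pv_pair_eq (a b : Int × Int) :
    get_antinodes_for_pair a b
      = ((2 * a.1 - b.1, 2 * a.2 - b.2), (2 * b.1 - a.1, 2 * b.2 - a.2)) := by
  simp [get_antinodes_for_pair, Prod.ext_iff]
  omega

-- folding Set.add over one frequency's flat candidate list = A's pairwise double-add loop
theorem pv_freq_inner (a : Int × Int) (t : List (Int × Int)) (s : PySem.Set (Int × Int)) :
    (t.flatMap (fun b =>
        [(2 * a.1 - b.1, 2 * a.2 - b.2), (2 * b.1 - a.1, 2 * b.2 - a.2)])).foldl PySem.Set.add s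
      = (t.map (fun b => (a, b))).foldl (fun s c =>
          PySem.Set.add (PySem.Set.add s (2 * c.1.1 - c.2.1, 2 * c.1.2 - c.2.2))
            (2 * c.2.1 - c.1.1, 2 * c.2.2 - c.1.2)) s := by
  induction t generalizing s with
  | nil => rfl
  | cons b t ihb =>
      simp only [List.flatMap_cons, List.map_cons, List.foldl_append, List.foldl_cons,
        List.foldl_nil]
      exact ihb _

theorem pv_freq_eq (v : List (Int × Int)) (s : PySem.Set (Int × Int)) :
    (pvAntinodesB v).foldl PySem.Set.add s
      = (pvCombinations2 v).foldl (fun s c =>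
          let pts := get_antinodes_for_pair c.1 c.2
          PySem.Set.add (PySem.Set.add s pts.1) pts.2) s := by
  simp only [pv_pair_eq]
  induction v generalizing s with
  | nil => rfl
  | cons a rest ih =>
      simp only [pvAntinodesB, pvCombinations2, List.foldl_append]
      rw [ih]
      congr 1
      exact pv_freq_inner a rest s

-- folding Set.add over a flatMap = the nested fold over each block
theorem pv_flatMap_foldl {α β : Type} [BEq β] (f : α → List β) (l : List α)
    (s : PySem.Set β) :
    (l.flatMap f).foldl PySem.Set.add s
      = l.foldl (fun s x => (f x).foldl PySem.Set.add s) s := by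
  induction l generalizing s with
  | nil => rfl
  | cons x t ih => simp only [List.flatMap_cons, List.foldl_append, List.foldl_cons]; exact ih _

-- A's outer loop and B's outer flatMap fold agree for any accumulator
theorem pv_outer (d : List (String × List (Int × Int))) (s : PySem.Set (Int × Int)) :
    d.foldl (fun acc kv =>
      (pvCombinations2 kv.2).foldl (fun s c =>
        let pts := get_antinodes_for_pair c.1 c.2
        PySem.Set.add (PySem.Set.add s pts.1) pts.2) acc) s
      = d.foldl (fun s kv => (pvAntinodesB kv.2).foldl PySem.Set.add s) s := by
  induction d generalizing s with
  | nil => rfl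
  | cons kv t ih => simp only [List.foldl_cons]; rw [pv_freq_eq]; exact ih _

-- ===== VERDICT (by name: the statement is the Claim_ definition above) =====
theorem find_unfiltered_antinodes_locations_spec : Claim_equal_find_unfiltered_antinodes_locations := by
  intro d _
  unfold Spec_find_unfiltered_antinodes_locations find_unfiltered_antinodes_locations
    find_unfiltered_antinodes_locations_alt
  rw [PySem.Set.ofList_eq_foldl, pv_flatMap_foldl]
  show List.foldl _ ([] : PySem.Set (Int × Int)) _ = _
  exact pv_outer d []
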